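-- pv_equiv track=rewrite | github.com/ryansakurai/competitive-programming | list-06/even_array.py | count_mismatches
-- ===== SOURCE A (Python) =====
-- from typing import Dict
--
-- class MismatchType:
--     ITEM_NOT_EVEN = 0
--     ITEM_NOT_ODD = 1
--
-- def count_mismatches(array: list[int]) -> Dict[MismatchType, int]:
--     qt_mismatches = {
--         MismatchType.ITEM_NOT_EVEN: 0,
--         MismatchType.ITEM_NOT_ODD: 0,
--     }
--
--     for idx, item in enumerate(array):
--         if idx % 2 == 0 and item % 2 != 0:
--             qt_mismatches[MismatchType.ITEM_NOT_ODD] += 1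
--         elif idx % 2 != 0 and item % 2 == 0:
--             qt_mismatches[MismatchType.ITEM_NOT_EVEN] += 1
--
--     return qt_mismatches
-- ===== SOURCE B (Python) =====
-- from typing import Dict
--
-- class MismatchType:
--     ITEM_NOT_EVEN = 0
--     ITEM_NOT_ODD = 1
--
-- def count_mismatches(array: list[int]) -> Dict[MismatchType, int]:
--     # Walk the array two items (one even index, one odd index) per step and
--     # count branch-free: item % 2 is 1 exactly for an odd item, 1 - item % 2
--     # exactly for an even one.
--     not_odd = 0    # odd items sitting at even indices
--     not_even = 0   # even items sitting at odd indices
--     n = len(array)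
--     i = 0
--     while i < n:
--         not_odd += array[i] % 2
--         if i + 1 < n:
--             not_even += 1 - array[i + 1] % 2
--         i += 2
--     return {
--         MismatchType.ITEM_NOT_EVEN: not_even,
--         MismatchType.ITEM_NOT_ODD: not_odd,
--     }
-- ===== Notes on version B (the rewrite author's own statement) =====
-- stated objective: alternative
-- what changed: Replaces the enumerate loop with index-parity tests and dict mutation by a stride-2 walk that consumes one even-index/odd-index pair per step and accumulates the two counters branch-free via item % 2 arithmetic, building the result dict once at the end.
import Mathlib
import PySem

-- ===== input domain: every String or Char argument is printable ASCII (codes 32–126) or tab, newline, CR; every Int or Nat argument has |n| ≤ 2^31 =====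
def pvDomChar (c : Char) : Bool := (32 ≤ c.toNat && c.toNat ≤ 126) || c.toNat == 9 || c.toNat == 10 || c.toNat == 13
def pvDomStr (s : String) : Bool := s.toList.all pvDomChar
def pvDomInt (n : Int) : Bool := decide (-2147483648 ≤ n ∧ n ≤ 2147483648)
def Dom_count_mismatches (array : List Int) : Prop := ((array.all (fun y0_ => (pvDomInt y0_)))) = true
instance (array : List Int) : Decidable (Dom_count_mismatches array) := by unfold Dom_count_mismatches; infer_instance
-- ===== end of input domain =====

-- B replaces A's enumerate loop (index-parity branches mutating a dict) by a stride-2 walk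
-- consuming an even/odd-index pair per step with branch-free `item % 2` counter arithmetic.


-- ===== PORT A =====
-- loop body: the two mismatch branches of A (MismatchType.ITEM_NOT_EVEN = 0, ITEM_NOT_ODD = 1)
def pvStepA (d : PySem.Dict Int Int) (p : Int × Int) : PySem.Dict Int Int :=
  if PySem.Int.mod p.1 2 == 0 && PySem.Int.mod p.2 2 != 0 then d.modify 1 0 (· + 1)
  else if PySem.Int.mod p.1 2 != 0 && PySem.Int.mod p.2 2 == 0 then d.modify 0 0 (· + 1)
  else d

def count_mismatches (array : List Int) : List (Int × Int) :=
  ((PySem.List.enumerate array 0).foldl pvStepA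
    ((PySem.Dict.empty.insert 0 0).insert 1 0)).items

-- ===== PORT B =====
-- B's `while i < n` stride-2 index loop, rendered as two-at-a-time structural recursion on the
-- remaining suffix (array[i] is the head, array[i+1] the second element; i+1 ≥ n iff ≤ 1 left).
def pvAltLoop : List Int → Int → Int → Int × Int
  | [], not_odd, not_even => (not_odd, not_even)
  | [a], not_odd, not_even => (not_odd + PySem.Int.mod a 2, not_even)
  | a :: b :: rest, not_odd, not_even =>
      pvAltLoop rest (not_odd + PySem.Int.mod a 2) (not_even + (1 - PySem.Int.mod b 2))

def count_mismatches_alt (array : List Int) : List (Int × Int) :=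
  let p := pvAltLoop array 0 0
  [(0, p.2), (1, p.1)]

-- ===== PRECONDITION & SPEC =====
def Spec_count_mismatches (array : List Int) (out : List (Int × Int)) : Prop := out = count_mismatches_alt array
instance (array : List Int) (out : List (Int × Int)) : Decidable (Spec_count_mismatches array out) := by unfold Spec_count_mismatches; infer_instance

-- ===== CLAIM (what is proved, stated in full; the proofs are below) =====
def Claim_equal_count_mismatches : Prop := ∀ (array : List Int), Dom_count_mismatches array → Spec_count_mismatches array (count_mismatches array)

-- ===== LEMMAS AND PROOFS =====
lemma pv_mod_succ (s : Int) (h : PySem.Int.mod s 2 = 0) : PySem.Int.mod (s + 1) 2 = 1 := by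
  simp [PySem.Int.mod, Int.fmod_eq_emod] at *; omega

lemma pv_mod_add_two (s : Int) (h : PySem.Int.mod s 2 = 0) : PySem.Int.mod (s + 2) 2 = 0 := by
  simp [PySem.Int.mod, Int.fmod_eq_emod] at *; omega

lemma pv_step_even (no ne a s : Int) (hs : PySem.Int.mod s 2 = 0) :
    pvStepA ((PySem.Dict.empty.insert 0 ne).insert 1 no) (s, a)
      = (PySem.Dict.empty.insert 0 ne).insert 1 (no + PySem.Int.mod a 2) := by
  rcases PySem.Int.mod_two_eq a with h | h <;>
    simp_all [pvStepA, PySem.Int.mod, Int.fmod_eq_emod, PySem.Dict.modify, PySem.Dict.insert,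
      PySem.Dict.empty, PySem.Dict.getD, PySem.Dict.get?]

lemma pv_step_odd (no ne b s : Int) (hs : PySem.Int.mod s 2 = 1) :
    pvStepA ((PySem.Dict.empty.insert 0 ne).insert 1 no) (s, b)
      = (PySem.Dict.empty.insert 0 (ne + (1 - PySem.Int.mod b 2))).insert 1 no := by
  rcases PySem.Int.mod_two_eq b with h | h <;>
    simp_all [pvStepA, PySem.Int.mod, Int.fmod_eq_emod, PySem.Dict.modify, PySem.Dict.insert,
      PySem.Dict.empty, PySem.Dict.getD, PySem.Dict.get?]
  omega

lemma pv_loop_eq : ∀ (xs : List Int) (s no ne : Int), PySem.Int.mod s 2 = 0 →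
    (PySem.List.enumerate xs s).foldl pvStepA ((PySem.Dict.empty.insert 0 ne).insert 1 no)
      = (PySem.Dict.empty.insert 0 (pvAltLoop xs no ne).2).insert 1 (pvAltLoop xs no ne).1
  | [], s, no, ne, _ => by simp [PySem.List.enumerate_nil, pvAltLoop]
  | [a], s, no, ne, hs => by
      simp [PySem.List.enumerate_cons, PySem.List.enumerate_nil, pvAltLoop,
        pv_step_even no ne a s hs]
  | a :: b :: rest, s, no, ne, hs => by
      rw [PySem.List.enumerate_cons, PySem.List.enumerate_cons]
      simp only [List.foldl_cons, pv_step_even no ne a s hs,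
        pv_step_odd _ _ b (s + 1) (pv_mod_succ s hs), pvAltLoop]
      exact pv_loop_eq rest (s + 1 + 1) _ _ (by
        have := pv_mod_add_two s hs; simpa [add_assoc] using this)

-- ===== VERDICT (by name: the statement is the Claim_ definition above) =====
theorem count_mismatches_spec : Claim_equal_count_mismatches := by
  intro array _
  unfold Spec_count_mismatches count_mismatches count_mismatches_alt
  rw [pv_loop_eq array 0 0 0 rfl]
  rfl
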